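-- pv_equiv track=rewrite | github.com/goosebones/spellotron | missed.py | add_letter
-- ===== SOURCE A (Python) =====
-- def add_letter(word, letter, idx):
--     """ inserts a letter into a word at an index
--         uses a list method
--         :param word: word to modify
--         :param letter: letter to insert into word
--         :param idx: index to insert letter at
--     """
--     letter_list = []
--     new_word = ""
--     for ch in word:
--         letter_list.append(ch)
--     letter_list.insert(idx + 1, letter)
--     for element in letter_list:
--         new_word += element
--     return new_word
-- ===== SOURCE B (Python) =====
-- def add_letter(word, letter, idx):
--     """ inserts a letter into a word at an index
--         closed-form slice splice: no list building, no loops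
--     """
--     return word[:idx + 1] + letter + word[idx + 1:]
-- ===== Notes on version B (the rewrite author's own statement) =====
-- stated objective: idiomatic
-- what changed: Replaces the char-list build, list.insert and character-by-character string reassembly with a single closed-form slice splice word[:idx+1] + letter + word[idx+1:].
import Mathlib
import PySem

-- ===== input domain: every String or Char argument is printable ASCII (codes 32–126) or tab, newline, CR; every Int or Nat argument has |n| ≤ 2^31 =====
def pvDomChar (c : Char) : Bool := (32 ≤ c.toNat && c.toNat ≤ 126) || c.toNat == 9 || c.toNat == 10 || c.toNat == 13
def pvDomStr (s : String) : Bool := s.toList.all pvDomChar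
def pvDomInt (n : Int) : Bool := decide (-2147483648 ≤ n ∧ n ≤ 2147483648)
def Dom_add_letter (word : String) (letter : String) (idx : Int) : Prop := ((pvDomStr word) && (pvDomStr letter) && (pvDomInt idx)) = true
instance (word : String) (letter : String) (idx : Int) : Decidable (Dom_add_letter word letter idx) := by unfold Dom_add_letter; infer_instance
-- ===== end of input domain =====

-- B replaces A's char-list build + list.insert + char-by-char reassembly with one closed-form slice splice (idiomatic).

-- ===== PORT A =====
def add_letter (word : String) (letter : String) (idx : Int) : String :=
  -- letter_list = []; for ch in word: letter_list.append(ch)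
  -- letter_list.insert(idx + 1, letter)
  -- new_word = ""; for element in letter_list: new_word += element; return new_word
  (PySem.List.insert
      (word.toList.foldl (fun acc ch => acc ++ [String.singleton ch]) [])
      (idx + 1) letter).foldl
    (fun new_word element => new_word ++ element) ""

-- ===== PORT B =====
def add_letter_alt (word : String) (letter : String) (idx : Int) : String :=
  PySem.Str.slice word none (some (idx + 1)) ++ letter ++ PySem.Str.slice word (some (idx + 1)) none

-- ===== PRECONDITION & SPEC =====
def Spec_add_letter (word : String) (letter : String) (idx : Int) (out : String) : Prop := out = add_letter_alt word letter idx
instance (word : String) (letter : String) (idx : Int) (out : String) : Decidable (Spec_add_letter word letter idx out) := by unfold Spec_add_letter; infer_instance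

-- ===== CLAIM (what is proved, stated in full; the proofs are below) =====
def Claim_equal_add_letter : Prop := ∀ (word : String) (letter : String) (idx : Int), Dom_add_letter word letter idx → Spec_add_letter word letter idx (add_letter word letter idx)

-- ===== LEMMAS AND PROOFS =====

-- A's first loop builds the list of one-character strings of word.
theorem foldl_append_singleton (cs : List Char) (acc : List String) :
    cs.foldl (fun acc ch => acc ++ [String.singleton ch]) acc = acc ++ cs.map String.singleton := by
  induction cs generalizing acc with
  | nil => simp
  | cons c cs ih => simp [List.foldl_cons, ih]

-- A's second loop concatenates: on toList it is a flatten.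
theorem toList_foldl_append (l : List String) (s : String) :
    (l.foldl (fun a e => a ++ e) s).toList = s.toList ++ (l.map String.toList).flatten := by
  induction l generalizing s with
  | nil => simp
  | cons x xs ih => simp [List.foldl_cons, ih]

-- taking everything that remains after a drop is the drop itself.
theorem take_sub_drop {α : Type} (xs : List α) (k : Nat) :
    List.take (xs.length - k) (List.drop k xs) = List.drop k xs :=
  List.take_of_length_le (by simp)

-- list.insert at an arbitrary Int position splits exactly where slicing does.
theorem insert_eq_slice_split {α : Type} (xs : List α) (i : Int) (v : α) :
    PySem.List.insert xs i v
      = PySem.List.slice xs none (some i) ++ v :: PySem.List.slice xs (some i) none := by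
  simp only [PySem.List.insert, PySem.List.sliceIndices, PySem.List.slice, PySem.List.clampIdx]
  split_ifs with h1 h2 <;> simp_all
  · have h0 : (max (i + (xs.length : Int)) 0).toNat = 0 := by omega
    simp [h0]
  · have hk : (max (i + (xs.length : Int)) 0).toNat = ((xs.length : Int) + i).toNat := by omega
    rw [hk, take_sub_drop]
  · have hk : (min i (xs.length : Int)).toNat = min i.toNat xs.length := by omega
    rw [hk, take_sub_drop]

-- slicing commutes with map (slice is clamped take/drop, and map preserves length).
theorem slice_map {α β : Type} (f : α → β) (l : List α) (a? b? : Option Int) :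
    PySem.List.slice (l.map f) a? b? = (PySem.List.slice l a? b?).map f := by
  simp [PySem.List.slice, List.map_take, List.map_drop]

-- flattening the one-character strings of a char list gives the char list back.
theorem flatten_singletons (l : List Char) :
    (l.map (String.toList ∘ String.singleton)).flatten = l := by
  induction l with
  | nil => rfl
  | cons c cs ih => simp [String.singleton, ih]

theorem add_letter_eq (word letter : String) (idx : Int) :
    add_letter word letter idx = add_letter_alt word letter idx := by
  apply String.ext
  show (add_letter word letter idx).toList = (add_letter_alt word letter idx).toList
  unfold add_letter add_letter_alt
  rw [foldl_append_singleton, List.nil_append, insert_eq_slice_split,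
      slice_map, slice_map, toList_foldl_append]
  simp [PySem.Str.toList_slice, PySem.Chars.slice_eq_listSlice, List.flatten_append,
        List.map_map, flatten_singletons]

-- ===== VERDICT (by name: the statement is the Claim_ definition above) =====
theorem add_letter_spec : Claim_equal_add_letter := by
  intro word letter idx _
  exact add_letter_eq word letter idx
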